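-- pv_equiv track=rewrite | github.com/kimdouk/Algorithm-PS | 백준/Silver/1652. 누울 자리를 찾아라/누울 자리를 찾아라.py | search
-- ===== SOURCE A (Python) =====
-- def search(line):
--     cnt, result = 0,0
--     for i in range(len(line)):
--         if line[i]=='.':
--             cnt+=1
--         if cnt>=2 and line[i]=='X':
--             result+=1
--             cnt =0
--         elif cnt>=2 and i==len(line)-1:
--             result+=1
--         elif cnt<2 and line[i]=='X':
--             cnt = 0
--     return result
-- ===== SOURCE B (Python) =====
-- def search(line):
--     return sum(1 for seg in line.split('X') if seg.count('.') >= 2)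
-- ===== Notes on version B (the rewrite author's own statement) =====
-- stated objective: idiomatic
-- what changed: Replaces the index loop with running-counter/reset state machine (and its special last-index case) by splitting the line on the separator character and counting the segments that contain at least two dots.
import Mathlib
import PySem

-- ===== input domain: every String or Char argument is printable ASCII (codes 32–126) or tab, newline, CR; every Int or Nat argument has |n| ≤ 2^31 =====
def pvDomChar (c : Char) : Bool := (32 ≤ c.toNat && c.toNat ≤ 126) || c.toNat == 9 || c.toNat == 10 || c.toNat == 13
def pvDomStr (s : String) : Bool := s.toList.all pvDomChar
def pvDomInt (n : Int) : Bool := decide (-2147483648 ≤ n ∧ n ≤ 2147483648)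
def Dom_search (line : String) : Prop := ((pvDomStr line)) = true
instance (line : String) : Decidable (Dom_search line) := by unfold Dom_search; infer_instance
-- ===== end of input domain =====

-- B replaces A's running-counter state machine (with its special last-index case) by
-- split-on-'X' and counting the segments holding at least two dots (idiomatic; same O(n) cost).

-- ===== PORT A =====
def search (line : String) : Int :=
  ((PySem.List.pyRange 0 (PySem.Str.len line) 1).foldl
    (fun (p : Int × Int) i =>
      let c := PySem.List.pyGetD line.toList i ' '
      let cnt := if c = '.' then p.1 + 1 else p.1
      if 2 ≤ cnt ∧ c = 'X' then (0, p.2 + 1)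
      else if 2 ≤ cnt ∧ i = PySem.Str.len line - 1 then (cnt, p.2 + 1)
      else if cnt < 2 ∧ c = 'X' then (0, p.2)
      else (cnt, p.2)) ((0 : Int), (0 : Int))).2

-- ===== PORT B =====
def search_alt (line : String) : Int :=
  ((((PySem.Str.split? line "X").getD []).countP
      (fun seg => 2 ≤ PySem.Str.count seg ".") : Nat) : Int)

-- ===== PRECONDITION & SPEC =====
def Spec_search (line : String) (out : Int) : Prop := out = search_alt line
instance (line : String) (out : Int) : Decidable (Spec_search line out) := by unfold Spec_search; infer_instance

-- ===== CLAIM (what is proved, stated in full; the proofs are below) =====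
def Claim_equal_search : Prop := ∀ (line : String), Dom_search line → Spec_search line (search line)

-- ===== LEMMAS AND PROOFS =====

-- A's loop as structural recursion over the character list
def loopA : List Char → Int → Int → Int
  | [], _, res => res
  | c :: rest, cnt, res =>
    let cnt1 := if c = '.' then cnt + 1 else cnt
    if 2 ≤ cnt1 ∧ c = 'X' then loopA rest 0 (res + 1)
    else if 2 ≤ cnt1 ∧ rest = [] then loopA rest cnt1 (res + 1)
    else if cnt1 < 2 ∧ c = 'X' then loopA rest 0 res
    else loopA rest cnt1 res

-- the segments of cs split on 'X'
def segsX : List Char → List (List Char)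
  | [] => [[]]
  | c :: rest => if c = 'X' then [] :: segsX rest else (segsX rest).modifyHead (c :: ·)

theorem segsX_ne_nil : ∀ cs : List Char, segsX cs ≠ []
  | [] => by simp [segsX]
  | c :: rest => by
    simp only [segsX]
    split_ifs
    · simp
    · cases h : segsX rest with
      | nil => exact absurd h (segsX_ne_nil rest)
      | cons a t => simp

-- Chars.count with a single-character needle is List.count
theorem countGo_nil (ch : Char) (fuel acc : Nat) :
    PySem.Chars.count.go [ch] fuel [] acc = acc := by
  cases fuel <;> rfl

theorem countGo_cons (ch c : Char) (t : List Char) (f acc : Nat) :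
    PySem.Chars.count.go [ch] (f + 1) (c :: t) acc
      = if ch = c then PySem.Chars.count.go [ch] f t (acc + 1)
        else PySem.Chars.count.go [ch] f t acc := by
  rw [PySem.Chars.count.go]
  simp [List.isPrefixOf]

theorem count_go_singleton (ch : Char) :
    ∀ (l : List Char) (fuel acc : Nat), l.length ≤ fuel →
      PySem.Chars.count.go [ch] fuel l acc = acc + l.count ch
  | [], fuel, acc, _ => by simp [countGo_nil]
  | c :: t, fuel, acc, h => by
    cases fuel with
    | zero => simp at h
    | succ f =>
      rw [countGo_cons]
      by_cases hc : ch = c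
      · rw [if_pos hc, count_go_singleton ch t f (acc + 1) (by simp at h; omega)]
        have : (c == ch) = true := by simp [hc.symm]
        simp [List.count_cons, this]
        omega
      · rw [if_neg hc, count_go_singleton ch t f acc (by simp at h; omega)]
        have : (c == ch) = false := by simp; exact fun e => hc e.symm
        simp [List.count_cons, this]

theorem count_singleton (ch : Char) (cs : List Char) :
    PySem.Chars.count cs [ch] = cs.count ch := by
  rw [PySem.Chars.count]
  simp only [List.isEmpty, if_neg Bool.false_ne_true]
  rw [count_go_singleton ch cs cs.length 0 le_rfl]
  simp

-- Chars.splitOn with a single-character separator is segsX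
theorem splitOnGo_nil (cur : List Char) (acc : List (List Char)) (fuel : Nat) :
    PySem.Chars.splitOn.go ['X'] fuel [] cur acc = (cur.reverse :: acc).reverse := by
  cases fuel <;> simp [PySem.Chars.splitOn.go]

theorem splitOnGo_cons (c : Char) (t cur : List Char) (acc : List (List Char)) (f : Nat) :
    PySem.Chars.splitOn.go ['X'] (f + 1) (c :: t) cur acc
      = if 'X' = c then PySem.Chars.splitOn.go ['X'] f t [] (cur.reverse :: acc)
        else PySem.Chars.splitOn.go ['X'] f t (c :: cur) acc := by
  rw [PySem.Chars.splitOn.go]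
  simp [List.isPrefixOf]

theorem splitOn_go_X :
    ∀ (l : List Char) (fuel : Nat) (cur : List Char) (acc : List (List Char)),
      l.length ≤ fuel →
      PySem.Chars.splitOn.go ['X'] fuel l cur acc
        = acc.reverse ++ (segsX l).modifyHead (cur.reverse ++ ·)
  | [], fuel, cur, acc, _ => by simp [splitOnGo_nil, segsX]
  | c :: t, fuel, cur, acc, h => by
    cases fuel with
    | zero => simp at h
    | succ f =>
      rw [splitOnGo_cons]
      by_cases hc : c = 'X'
      · rw [if_pos hc.symm, splitOn_go_X t f [] (cur.reverse :: acc) (by simp at h; omega)]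
        rcases hs : segsX t with _ | ⟨a, l⟩
        · exact absurd hs (segsX_ne_nil t)
        · simp [segsX, hc, hs]
      · rw [if_neg (fun e => hc e.symm), splitOn_go_X t f (c :: cur) acc (by simp at h; omega)]
        rcases hs : segsX t with _ | ⟨a, l⟩
        · exact absurd hs (segsX_ne_nil t)
        · simp [segsX, hc, hs]

theorem splitOn_X (cs : List Char) : PySem.Chars.splitOn cs ['X'] = segsX cs := by
  rw [PySem.Chars.splitOn, splitOn_go_X cs (cs.length + 1) [] [] (by omega)]
  rcases hs : segsX cs with _ | ⟨a, l⟩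
  · exact absurd hs (segsX_ne_nil cs)
  · simp

-- the index fold of A is loopA on the remaining characters
theorem foldA_drop (s : List Char) :
    ∀ (m k : Nat) (p : Int × Int), s.length - k = m → k ≤ s.length →
    ((PySem.List.pyRange (k : Int) (s.length : Int) 1).foldl
      (fun (p : Int × Int) i =>
        let c := PySem.List.pyGetD s i ' '
        let cnt := if c = '.' then p.1 + 1 else p.1
        if 2 ≤ cnt ∧ c = 'X' then (0, p.2 + 1)
        else if 2 ≤ cnt ∧ i = (s.length : Int) - 1 then (cnt, p.2 + 1)
        else if cnt < 2 ∧ c = 'X' then (0, p.2)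
        else (cnt, p.2)) p).2 = loopA (s.drop k) p.1 p.2 := by
  intro m
  induction m with
  | zero =>
    intro k p hm hk
    have hk' : k = s.length := by omega
    rw [PySem.List.pyRange_one_eq_nil (by exact_mod_cast le_of_eq hk'.symm)]
    simp [hk', loopA]
  | succ m ih =>
    intro k p hm hk
    have hklt : k < s.length := by omega
    rw [PySem.List.pyRange_one_cons (by exact_mod_cast hklt)]
    rw [List.foldl_cons]
    have hc : PySem.List.pyGetD s (k : Int) ' ' = s[k] := by
      rw [PySem.List.pyGetD_natCast, List.getD_eq_getElem s ' ' hklt]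
    have hlast : ((k : Int) = (s.length : Int) - 1) ↔ s.drop (k + 1) = [] := by
      rw [List.drop_eq_nil_iff]
      omega
    rw [List.drop_eq_getElem_cons hklt]
    simp only [hc, loopA]
    have hcast : ((k : Int) + 1) = ((k + 1 : Nat) : Int) := by push_cast; ring
    by_cases h1 : 2 ≤ (if s[k] = '.' then p.1 + 1 else p.1) ∧ s[k] = 'X'
    · simp only [if_pos h1, hcast, ih (k + 1) (0, p.2 + 1) (by omega) (by omega)]
    · simp only [if_neg h1]
      by_cases h2 : 2 ≤ (if s[k] = '.' then p.1 + 1 else p.1) ∧ s.drop (k + 1) = []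
      · rw [if_pos ⟨h2.1, hlast.mpr h2.2⟩, if_pos h2]
        rw [hcast, ih (k + 1) _ (by omega) (by omega)]
      · rw [if_neg (fun h => h2 ⟨h.1, hlast.mp h.2⟩), if_neg h2]
        by_cases h3 : (if s[k] = '.' then p.1 + 1 else p.1) < 2 ∧ s[k] = 'X'
        · simp only [if_pos h3, hcast, ih (k + 1) (0, p.2) (by omega) (by omega)]
        · simp only [if_neg h3, hcast, ih (k + 1) _ (by omega) (by omega)]

def segPred (seg : List Char) : Bool := decide (2 ≤ seg.count '.')

-- the invariant: loopA counts the qualifying segments, the first one offset by cnt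
theorem loopA_invariant :
    ∀ (s : List Char) (cnt res : Int), s ≠ [] →
    loopA s cnt res
      = res + (if 2 ≤ cnt + ((segsX s).headI.count '.' : Int) then 1 else 0)
          + (((segsX s).tail.countP segPred : Nat) : Int)
  | [], _, _, hne => absurd rfl hne
  | c :: rest, cnt, res, _ => by
    rcases hr : rest with _ | ⟨c', rest'⟩
    · subst hr
      by_cases hc : c = 'X'
      · subst hc
        by_cases h2 : 2 ≤ cnt
        · simp [loopA, segsX, h2, segPred]
        · have h3 : cnt < 2 := by omega
          simp [loopA, segsX, h2, h3, segPred]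
      · by_cases hd : c = '.'
        · subst hd
          by_cases h2 : 2 ≤ cnt + 1
          · simp [loopA, segsX, h2]
          · simp [loopA, segsX, h2]
        · by_cases h2 : 2 ≤ cnt
          · simp [loopA, segsX, hc, hd, h2]
          · simp [loopA, segsX, hc, hd, h2]
    · have hne' : rest ≠ [] := by rw [hr]; simp
      rw [← hr]
      have key := loopA_invariant rest (if c = '.' then cnt + 1 else cnt) res hne'
      have key0 : ∀ r : Int, loopA rest 0 r
          = r + (((segsX rest).countP segPred : Nat) : Int) := by
        intro r
        have k := loopA_invariant rest 0 r hne'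
        rcases hs : segsX rest with _ | ⟨a, l⟩
        · exact absurd hs (segsX_ne_nil rest)
        · rw [hs] at k
          rw [k]
          simp [List.countP_cons, segPred]
          split_ifs <;> omega
      by_cases hc : c = 'X'
      · subst hc
        have hstep : loopA ('X' :: rest) cnt res
            = if 2 ≤ cnt then loopA rest 0 (res + 1) else loopA rest 0 res := by
          by_cases h2 : 2 ≤ cnt
          · simp [loopA, h2]
          · have h3 : cnt < 2 := by omega
            simp [loopA, h2, h3]
        rw [hstep]
        have hseg : segsX ('X' :: rest) = [] :: segsX rest := by simp [segsX]
        rw [hseg]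
        simp only [List.headI, List.tail, List.count_nil, Nat.cast_zero, add_zero]
        split_ifs with h1
        · rw [key0]
        · rw [key0]; ring
      · have hstep : loopA (c :: rest) cnt res
            = loopA rest (if c = '.' then cnt + 1 else cnt) res := by
          simp [loopA, hc, hne']
        rw [hstep, key]
        rcases hs : segsX rest with _ | ⟨a, l⟩
        · exact absurd hs (segsX_ne_nil rest)
        · have hseg : segsX (c :: rest) = (c :: a) :: l := by simp [segsX, hc, hs]
          rw [hseg]
          simp only [List.headI, List.tail]
          by_cases hd : c = '.'
          · simp only [hd, List.count_cons]
            simp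
            split_ifs <;> omega
          · have : ¬ ('.' = c) := fun e => hd e.symm
            simp only [if_neg hd, List.count_cons]
            simp [hd]

-- ===== VERDICT (by name: the statement is the Claim_ definition above) =====
theorem search_spec : Claim_equal_search := by
  intro line _
  unfold Spec_search search search_alt
  have hsplit : (PySem.Str.split? line "X").getD []
      = (segsX line.toList).map String.ofList := by
    rw [PySem.Str.split?]
    have : ("X" : String).toList = ['X'] := rfl
    rw [this, PySem.Chars.split?]
    simp [splitOn_X]
  rw [hsplit, List.countP_map]
  have hfun : ((fun seg : String => decide (2 ≤ PySem.Str.count seg ".")) ∘ String.ofList)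
      = segPred := by
    funext seg
    simp [Function.comp, segPred, count_singleton]
  rw [hfun]
  -- now the A side
  have hlen : PySem.Str.len line = (line.toList.length : Int) := by simp
  rw [hlen]
  have hfold := foldA_drop line.toList (line.toList.length) 0 ((0 : Int), (0 : Int))
    (by omega) (by omega)
  simp only [Nat.cast_zero, List.drop_zero] at hfold
  rw [hfold]
  rcases hn : line.toList with _ | ⟨c, t⟩
  · simp [loopA, segsX, List.countP]
  · rw [loopA_invariant (c :: t) 0 0 (by simp)]
    rcases hs : segsX (c :: t) with _ | ⟨a, l⟩
    · exact absurd hs (segsX_ne_nil _)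
    · simp [List.countP_cons, segPred]
      split_ifs <;> omega
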